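-- pv_equiv track=rewrite | github.com/Roua-Khalfet/Startify | complianceguard/document_utils.py | _enforce_max_chars
-- ===== SOURCE A (Python) =====
-- def _enforce_max_chars(
--     text: str,
--     max_chars: int,
--     overlap: int,
-- ) -> list[str]:
--     """Garantit qu'aucun morceau ne dépasse max_chars."""
--     if len(text) <= max_chars:
--         return [text]
--
--     pieces: list[str] = []
--     start = 0
--
--     while start < len(text):
--         end = start + max_chars
--
--         if end >= len(text):
--             pieces.append(text[start:].strip())
--             break
--
--         best_break = -1
--         search_start = max(start, end - 400)
--         for i in range(end, search_start, -1):
--             if text[i] in ".!?\n":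
--                 best_break = i + 1
--                 break
--
--         if best_break > start:
--             pieces.append(text[start:best_break].strip())
--             start = max(start + 1, best_break - overlap)
--         else:
--             space_pos = text.rfind(" ", search_start, end)
--             if space_pos > start:
--                 pieces.append(text[start:space_pos].strip())
--                 start = max(start + 1, space_pos - overlap)
--             else:
--                 pieces.append(text[start:end].strip())
--                 start = end - overlap
--
--     return [p for p in pieces if p]
-- ===== SOURCE B (Python) =====
-- def _enforce_max_chars(
--     text: str,
--     max_chars: int,
--     overlap: int,
-- ) -> list[str]:
--     """One pre-pass collects sentence-boundary and space positions; the chunk loop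
--     then walks two monotone pointers over those sorted index lists instead of
--     re-scanning up to 400 characters backward per window."""
--     n = len(text)
--     if n <= max_chars:
--         return [text]
--
--     bounds = [i for i, c in enumerate(text) if c in ".!?\n"]
--     spaces = [i for i, c in enumerate(text) if c == " "]
--
--     pieces: list[str] = []
--     start = 0
--     bi = 0  # first index with bounds[bi] > previous end
--     si = 0  # first index with spaces[si] >= previous end
--
--     while start < n:
--         end = start + max_chars
--         if end >= n:
--             piece = text[start:].strip()
--             if piece:
--                 pieces.append(piece)
--             break
--
--         search_start = max(start, end - 400)
--         while bi < len(bounds) and bounds[bi] <= end: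
--             bi += 1
--         while si < len(spaces) and spaces[si] < end:
--             si += 1
--
--         if bi > 0 and bounds[bi - 1] > search_start:
--             cut = bounds[bi - 1] + 1
--             piece = text[start:cut].strip()
--             start = max(start + 1, cut - overlap)
--         elif si > 0 and spaces[si - 1] >= search_start and spaces[si - 1] > start:
--             sp = spaces[si - 1]
--             piece = text[start:sp].strip()
--             start = max(start + 1, sp - overlap)
--         else:
--             piece = text[start:end].strip()
--             start = end - overlap
--
--         if piece:
--             pieces.append(piece)
--
--     return pieces
-- ===== Notes on version B (the rewrite author's own statement) =====
-- stated objective: alternative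
-- what changed: One pre-pass collects the sorted index lists of sentence-boundary characters and spaces; the chunk loop then finds each window's best break by advancing two monotone pointers over those lists (amortized O(1) per window) instead of re-scanning up to 400 characters backward and calling rfind per window, and filters empty pieces online instead of in a final pass.
-- outside the precondition, e.g. on _enforce_max_chars('ab cd', -1, -3): A returns ['ab'], B returns ['ab c']
import Mathlib
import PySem

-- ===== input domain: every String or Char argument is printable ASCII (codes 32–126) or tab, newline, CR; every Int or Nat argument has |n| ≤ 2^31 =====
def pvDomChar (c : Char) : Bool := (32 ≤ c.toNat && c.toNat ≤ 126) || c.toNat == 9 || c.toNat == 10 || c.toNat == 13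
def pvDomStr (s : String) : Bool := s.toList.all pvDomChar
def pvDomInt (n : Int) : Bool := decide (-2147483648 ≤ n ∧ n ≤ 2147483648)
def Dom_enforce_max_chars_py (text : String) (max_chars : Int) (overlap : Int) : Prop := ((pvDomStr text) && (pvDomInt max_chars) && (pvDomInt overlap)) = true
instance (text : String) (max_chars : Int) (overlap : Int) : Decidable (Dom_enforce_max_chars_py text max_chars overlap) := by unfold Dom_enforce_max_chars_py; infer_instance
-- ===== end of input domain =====

-- B replaces A's per-window backward scans by one pre-pass that collects the sentence-boundary
-- and space positions, over which the chunk loop then walks two monotone pointers (alternative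
-- decomposition; same return value on Pre_).

-- ===== PORT A =====

def pvIsBreak (c : Char) : Bool := c == '.' || c == '!' || c == '?' || c == '\n'

-- A's backward for-loop: first index i of the given (descending) list with pred(text[i]);
-- the reads are always in range on admitted inputs, so the pyGetD default is never used.
def pvFirstHit (cs : List Char) (pred : Char → Bool) : List Int → Option Int
  | [] => none
  | i :: rest => if pred (PySem.List.pyGetD cs i ' ') then some i else pvFirstHit cs pred rest

-- A's while-loop; fuel n+1 suffices on Pre_ (start strictly increases each iteration).
def pvLoopA (cs : List Char) (n mc ov : Int) : Nat → Int → List (List Char) → List (List Char)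
  | 0, _, acc => acc
  | fuel+1, start, acc =>
    if start < n then
      let e := start + mc
      if n ≤ e then
        acc ++ [PySem.Chars.strip (PySem.List.slice cs (some start) none)]
      else
        let ss := max start (e - 400)
        let r := pvFirstHit cs pvIsBreak (PySem.List.pyRange e ss (-1))
        let bb : Int := match r with
          | some i => i + 1
          | none => -1
        if start < bb then
          pvLoopA cs n mc ov fuel (max (start + 1) (bb - ov))
            (acc ++ [PySem.Chars.strip (PySem.List.slice cs (some start) (some bb))])
        else
          let sp : Int := PySem.Chars.rfindFrom cs [' '] ss (some e)  -- text.rfind(" ", search_start, end)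
          if start < sp then
            pvLoopA cs n mc ov fuel (max (start + 1) (sp - ov))
              (acc ++ [PySem.Chars.strip (PySem.List.slice cs (some start) (some sp))])
          else
            pvLoopA cs n mc ov fuel (e - ov)
              (acc ++ [PySem.Chars.strip (PySem.List.slice cs (some start) (some e))])
    else acc

def enforce_max_chars_py (text : String) (max_chars : Int) (overlap : Int) : List String :=
  let cs := text.toList
  if (PySem.Str.len text) ≤ max_chars then [text]
  else
    ((pvLoopA cs (cs.length : Int) max_chars overlap (cs.length + 1) 0 []).filter
      (fun p => !p.isEmpty)).map (fun p => String.ofList p)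

-- ===== PORT B =====

-- [i for i, c in enumerate(text) if pred(c)]
def pvIdxWhere (cs : List Char) (pred : Char → Bool) : List Int :=
  ((PySem.List.enumerate cs 0).filter (fun p => pred p.2)).map (fun p => p.1)

-- while p < len(l) and cmp(l[p]): p += 1     (B's two inner pointer-advance loops)
def pvAdv (l : List Int) (cmp : Int → Bool) (p : Nat) : Nat :=
  if h : p < l.length then
    if cmp l[p] then pvAdv l cmp (p + 1) else p
  else p
termination_by l.length - p

-- B's while-loop over (start, bi, si); appends only non-empty stripped pieces.
def pvLoopB (cs : List Char) (n mc ov : Int) (bounds spaces : List Int) :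
    Nat → Int → Nat → Nat → List (List Char) → List (List Char)
  | 0, _, _, _, acc => acc
  | fuel+1, start, bi, si, acc =>
    if start < n then
      let e := start + mc
      if n ≤ e then
        let piece := PySem.Chars.strip (PySem.List.slice cs (some start) none)
        if piece.isEmpty then acc else acc ++ [piece]
      else
        let ss := max start (e - 400)
        let bi' := pvAdv bounds (fun v => decide (v ≤ e)) bi
        let si' := pvAdv spaces (fun v => decide (v < e)) si
        if 0 < bi' ∧ ss < bounds.getD (bi' - 1) 0 then
          let cut := bounds.getD (bi' - 1) 0 + 1
          let piece := PySem.Chars.strip (PySem.List.slice cs (some start) (some cut))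
          pvLoopB cs n mc ov bounds spaces fuel (max (start + 1) (cut - ov)) bi' si'
            (if piece.isEmpty then acc else acc ++ [piece])
        else if 0 < si' ∧ ss ≤ spaces.getD (si' - 1) 0 ∧ start < spaces.getD (si' - 1) 0 then
          let sp := spaces.getD (si' - 1) 0
          let piece := PySem.Chars.strip (PySem.List.slice cs (some start) (some sp))
          pvLoopB cs n mc ov bounds spaces fuel (max (start + 1) (sp - ov)) bi' si'
            (if piece.isEmpty then acc else acc ++ [piece])
        else
          let piece := PySem.Chars.strip (PySem.List.slice cs (some start) (some e))
          pvLoopB cs n mc ov bounds spaces fuel (e - ov) bi' si'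
            (if piece.isEmpty then acc else acc ++ [piece])
    else acc

def enforce_max_chars_py_alt (text : String) (max_chars : Int) (overlap : Int) : List String :=
  let cs := text.toList
  if (PySem.Str.len text) ≤ max_chars then [text]
  else
    (pvLoopB cs (cs.length : Int) max_chars overlap
      (pvIdxWhere cs pvIsBreak) (pvIdxWhere cs (fun c => c == ' '))
      (cs.length + 1) 0 0 0 []).map (fun p => String.ofList p)

-- ===== PRECONDITION & SPEC =====

-- Pre_ keeps the natural domain: it excludes (a) non-positive max_chars on over-long text, where
-- Python's negative-bound wraparound in rfind/slicing makes A's chunking an accident of slice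
-- semantics although A still returns, and (b) overlap ≥ max_chars, where A's hard-cut branch does
-- not advance and A loops forever on many inputs (on the rest its value is still returned).
def Pre_enforce_max_chars_py (text : String) (max_chars : Int) (overlap : Int) : Prop :=
  PySem.Str.len text ≤ max_chars ∨ (0 < max_chars ∧ overlap < max_chars)
instance (text : String) (max_chars : Int) (overlap : Int) : Decidable (Pre_enforce_max_chars_py text max_chars overlap) := by unfold Pre_enforce_max_chars_py; infer_instance

def pvWitness_enforce_max_chars_py : String × Int × Int := ("ab cd. ef", 4, 1)

def Spec_enforce_max_chars_py (text : String) (max_chars : Int) (overlap : Int) (out : List String) : Prop := out = enforce_max_chars_py_alt text max_chars overlap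
instance (text : String) (max_chars : Int) (overlap : Int) (out : List String) : Decidable (Spec_enforce_max_chars_py text max_chars overlap out) := by unfold Spec_enforce_max_chars_py; infer_instance

-- ===== CLAIM (what is proved, stated in full; the proofs are below) =====
def Claim_equal_enforce_max_chars_py : Prop := ∀ (text : String) (max_chars : Int) (overlap : Int), Dom_enforce_max_chars_py text max_chars overlap → Pre_enforce_max_chars_py text max_chars overlap → Spec_enforce_max_chars_py text max_chars overlap (enforce_max_chars_py text max_chars overlap)

-- ===== LEMMAS AND PROOFS =====

theorem pv_witness_ok : Dom_enforce_max_chars_py (pvWitness_enforce_max_chars_py.1) (pvWitness_enforce_max_chars_py.2.1) (pvWitness_enforce_max_chars_py.2.2) ∧ Pre_enforce_max_chars_py (pvWitness_enforce_max_chars_py.1) (pvWitness_enforce_max_chars_py.2.1) (pvWitness_enforce_max_chars_py.2.2) := by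
  constructor <;> decide

theorem pvIdxWhere_mem (cs : List Char) (pred : Char → Bool) (v : Int) :
    v ∈ pvIdxWhere cs pred ↔ ∃ (k : Nat) (h : k < cs.length), v = (k : Int) ∧ pred cs[k] = true := by
  simp only [pvIdxWhere, List.mem_map, List.mem_filter, PySem.List.mem_enumerate_iff]
  constructor
  · rintro ⟨p, ⟨⟨k, hk, rfl⟩, hpred⟩, rfl⟩
    exact ⟨k, hk, by simp, by simpa using hpred⟩
  · rintro ⟨k, hk, rfl, hpred⟩
    exact ⟨((k : Int), cs[k]), ⟨⟨k, hk, by simp⟩, by simpa using hpred⟩, rfl⟩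

theorem pvIdxWhere_sorted (cs : List Char) (pred : Char → Bool) :
    (pvIdxWhere cs pred).Pairwise (· < ·) := by
  unfold pvIdxWhere
  rw [List.pairwise_map]
  exact (PySem.List.pairwise_lt_enumerate cs 0).filter _

theorem pvAdv_spec (l : List Int) (cmp : Int → Bool) (p : Nat) (hp : p ≤ l.length)
    (hpre : ∀ j (hj : j < p), cmp (l[j]'(lt_of_lt_of_le hj hp)) = true) :
    pvAdv l cmp p ≤ l.length ∧ p ≤ pvAdv l cmp p ∧
    (∀ j (h2 : j < l.length), j < pvAdv l cmp p → cmp (l[j]'h2) = true) ∧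
    (∀ (h : pvAdv l cmp p < l.length), cmp (l[pvAdv l cmp p]'h) = false) := by
  induction hn : l.length - p generalizing p with
  | zero =>
    have hpl : p = l.length := by omega
    rw [pvAdv]
    simp only [show ¬ p < l.length by omega, dif_neg, not_false_iff]
    refine ⟨hp, le_refl _, ?_, ?_⟩
    · intro j h2 hj; exact hpre j (by omega)
    · intro h
      exact absurd h (by simp)
  | succ n ih =>
    have hpl : p < l.length := by omega
    rw [pvAdv]
    simp only [hpl, dif_pos]
    by_cases hc : cmp l[p] = true
    · simp only [hc, if_pos]
      have := ih (p+1) (by omega) (by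
        intro j hj
        rcases Nat.lt_succ_iff_lt_or_eq.mp hj with h | h
        · exact hpre j h
        · subst h; exact hc) (by omega)
      exact ⟨this.1, by omega, this.2.2.1, this.2.2.2⟩
    · simp only [hc, if_neg, Bool.not_eq_true]
      refine ⟨by omega, le_refl _, ?_, ?_⟩
      · intro j h2 hj; exact hpre j hj
      · intro _; trivial

theorem pvAdv_max (l : List Int) (cmp : Int → Bool) (p : Nat) (hp : p ≤ l.length)
    (hsort : l.Pairwise (· < ·))
    (hpre : ∀ j (hj : j < p), cmp (l[j]'(lt_of_lt_of_le hj hp)) = true)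
    (hmono : ∀ a b : Int, a ≤ b → cmp b = true → cmp a = true) :
    (∀ (_h : 0 < pvAdv l cmp p),
      l.getD (pvAdv l cmp p - 1) 0 ∈ l ∧ cmp (l.getD (pvAdv l cmp p - 1) 0) = true ∧
      ∀ v ∈ l, cmp v = true → v ≤ l.getD (pvAdv l cmp p - 1) 0) ∧
    (pvAdv l cmp p = 0 → ∀ v ∈ l, cmp v = false) := by
  obtain ⟨hq1, hq2, hq3, hq4⟩ := pvAdv_spec l cmp p hp hpre
  set q := pvAdv l cmp p with hqdef
  have hsort' := List.pairwise_iff_getElem.mp hsort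
  constructor
  · intro h0
    have hq1' : q - 1 < l.length := by omega
    have hgetD : l.getD (q-1) 0 = l[q-1]'hq1' := by
      rw [List.getD_eq_getElem?_getD, List.getElem?_eq_getElem hq1']; rfl
    refine ⟨?_, ?_, ?_⟩
    · rw [hgetD]; exact List.getElem_mem _
    · rw [hgetD]; exact hq3 (q-1) hq1' (by omega)
    · intro v hv hcmpv
      obtain ⟨j, hj, rfl⟩ := List.mem_iff_getElem.mp hv
      rw [hgetD]
      by_cases hjq : j < q
      · rcases Nat.lt_or_ge j (q-1) with hlt | hge
        · exact le_of_lt (hsort' j (q-1) hj hq1' hlt)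
        · have hje : j = q - 1 := by omega
          subst hje; exact le_refl _
      · have hql : q < l.length := by omega
        have hfalse := hq4 hql
        have hle : l[q]'hql ≤ l[j]'hj := by
          rcases Nat.eq_or_lt_of_le (show q ≤ j by omega) with h | h
          · exact le_of_eq (by congr)
          · exact le_of_lt (hsort' q j hql hj h)
        have := hmono _ _ hle hcmpv
        rw [this] at hfalse; cases hfalse
  · intro hq0 v hv
    obtain ⟨j, hj, rfl⟩ := List.mem_iff_getElem.mp hv
    have hql : q < l.length := by omega
    have hfalse := hq4 hql
    have hle : l[q]'hql ≤ l[j]'hj := by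
      rcases Nat.eq_or_lt_of_le (show q ≤ j by omega) with h | h
      · exact le_of_eq (by congr)
      · exact le_of_lt (hsort' q j hql hj h)
    cases hc : cmp (l[j]'hj)
    · rfl
    · have := hmono _ _ hle hc
      rw [this] at hfalse; cases hfalse

theorem pvFirstHit_none (cs : List Char) (pred : Char → Bool) (hi lo : Int)
    (h : ∀ i : Int, lo < i → i ≤ hi → pred (PySem.List.pyGetD cs i ' ') = false) :
    pvFirstHit cs pred (PySem.List.pyRange hi lo (-1)) = none := by
  induction hn : (hi - lo).toNat generalizing hi with
  | zero =>
    rw [PySem.List.pyRange_neg_one_eq_nil (by omega)]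
    rfl
  | succ n ih =>
    rw [PySem.List.pyRange_neg_one_cons (by omega)]
    rw [pvFirstHit, h hi (by omega) (le_refl _)]
    simp only [Bool.false_eq_true, if_false]
    exact ih (hi - 1) (fun i h1 h2 => h i h1 (by omega)) (by omega)

theorem pvFirstHit_some (cs : List Char) (pred : Char → Bool) (hi lo m : Int)
    (h1 : lo < m) (h2 : m ≤ hi) (h3 : pred (PySem.List.pyGetD cs m ' ') = true)
    (h4 : ∀ i : Int, m < i → i ≤ hi → pred (PySem.List.pyGetD cs i ' ') = false) :
    pvFirstHit cs pred (PySem.List.pyRange hi lo (-1)) = some m := by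
  induction hn : (hi - m).toNat generalizing hi with
  | zero =>
    have : hi = m := by omega
    subst this
    rw [PySem.List.pyRange_neg_one_cons (by omega), pvFirstHit, h3]
    simp
  | succ n ih =>
    rw [PySem.List.pyRange_neg_one_cons (by omega)]
    rw [pvFirstHit, h4 hi (by omega) (le_refl _)]
    simp only [Bool.false_eq_true, if_false]
    exact ih (hi - 1) (by omega) (fun i ha hb => h4 i ha (by omega)) (by omega)

theorem pvSingletonPrefix (c : Char) (l : List Char) :
    ([c] : List Char).isPrefixOf l = true ↔ l[0]? = some c := by
  cases l with
  | nil => simp [List.isPrefixOf]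
  | cons x xs => simp [List.isPrefixOf]; constructor
                 · intro h; simp [h]
                 · intro h; simp [h]

theorem pvRfindGo_neg (s sub : List Char) (k : Nat)
    (h : ∀ j : Nat, j ≤ k → sub.isPrefixOf (s.drop j) = false) :
    PySem.Chars.rfind.go s sub k = -1 := by
  induction k with
  | zero =>
    have := h 0 (le_refl _)
    simp only [List.drop_zero] at this
    rw [PySem.Chars.rfind.go, this]
    simp
  | succ n ih =>
    rw [PySem.Chars.rfind.go, h (n+1) (le_refl _)]
    simp only [Bool.false_eq_true, if_false]
    exact ih (fun j hj => h j (by omega))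

theorem pvRfindGo_eq (s sub : List Char) (k j : Nat) (hj : j ≤ k)
    (hp : sub.isPrefixOf (s.drop j) = true)
    (hmax : ∀ j' : Nat, j < j' → j' ≤ k → sub.isPrefixOf (s.drop j') = false) :
    PySem.Chars.rfind.go s sub k = (j : Int) := by
  induction k with
  | zero =>
    have : j = 0 := by omega
    subst this
    simp only [List.drop_zero] at hp
    rw [PySem.Chars.rfind.go, hp]
    simp
  | succ n ih =>
    by_cases hje : j = n + 1
    · subst hje
      rw [PySem.Chars.rfind.go, hp]
      simp
    · rw [PySem.Chars.rfind.go, hmax (n+1) (by omega) (le_refl _)]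
      simp only [Bool.false_eq_true, if_false]
      exact ih (by omega) (fun j' ha hb => hmax j' ha (by omega))

theorem pvPrefixAt (cs : List Char) (lo hi : Int) (hlh : lo ≤ hi)
    (hhi : hi ≤ (cs.length : Int)) (j : Nat) :
    ([' '] : List Char).isPrefixOf (((cs.take hi.toNat).drop lo.toNat).drop j) = true ↔
      (lo.toNat + j < hi.toNat ∧ cs[lo.toNat + j]? = some ' ') := by
  rw [pvSingletonPrefix]
  rw [List.getElem?_drop, List.getElem?_drop]
  constructor
  · intro h
    have hj : lo.toNat + (j + 0) < (cs.take hi.toNat).length := by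
      by_contra hc
      rw [List.getElem?_eq_none_iff.mpr (by omega)] at h
      cases h
    simp only [List.length_take] at hj
    rw [List.getElem?_take, if_pos (by omega)] at h
    exact ⟨by omega, by simpa using h⟩
  · rintro ⟨hlt, hsome⟩
    rw [List.getElem?_take, if_pos (by omega)]
    simpa using hsome

theorem pvRfind_reduce (cs sub : List Char) (lo hi : Int) (h0 : 0 ≤ lo) (hlh : lo ≤ hi)
    (hhi : hi ≤ (cs.length : Int)) :
    PySem.Chars.rfindFrom cs sub lo (some hi) =
      (if PySem.Chars.rfind ((cs.take hi.toNat).drop lo.toNat) sub = -1 then -1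
       else lo + PySem.Chars.rfind ((cs.take hi.toNat).drop lo.toNat) sub) := by
  rw [PySem.Chars.rfindFrom]
  have c1 : ¬((cs.length : Int) < hi) := by omega
  have c2 : ¬(hi < 0) := by omega
  have c3 : ¬(lo < 0) := by omega
  have c4 : ¬(hi < lo) := by omega
  simp only [if_neg c1, if_neg c2, if_neg c3, if_neg c4]

theorem pvRfind_none (cs : List Char) (lo hi : Int) (h0 : 0 ≤ lo) (hlh : lo ≤ hi)
    (hhi : hi ≤ (cs.length : Int))
    (h : ∀ i : Int, lo ≤ i → i < hi → cs[i.toNat]? ≠ some ' ') :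
    PySem.Chars.rfindFrom cs [' '] lo (some hi) = -1 := by
  rw [pvRfind_reduce cs [' '] lo hi h0 hlh hhi]
  have hr : PySem.Chars.rfind ((cs.take hi.toNat).drop lo.toNat) [' '] = -1 := by
    rw [PySem.Chars.rfind]
    apply pvRfindGo_neg
    intro j hj
    by_contra hc
    rw [Bool.not_eq_false] at hc
    obtain ⟨hlt, hsome⟩ := (pvPrefixAt cs lo hi hlh hhi j).mp hc
    refine h ((lo.toNat + j : Nat) : Int) (by omega) (by omega) ?_
    rw [show (((lo.toNat + j : Nat) : Int)).toNat = lo.toNat + j by omega]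
    exact hsome
  rw [hr]; simp

theorem pvRfind_some (cs : List Char) (lo hi m : Int) (h0 : 0 ≤ lo) (hlh : lo ≤ hi)
    (hhi : hi ≤ (cs.length : Int)) (h1 : lo ≤ m) (h2 : m < hi)
    (h3 : cs[m.toNat]? = some ' ')
    (h4 : ∀ i : Int, m < i → i < hi → cs[i.toNat]? ≠ some ' ') :
    PySem.Chars.rfindFrom cs [' '] lo (some hi) = m := by
  rw [pvRfind_reduce cs [' '] lo hi h0 hlh hhi]
  have hlen : ((cs.take hi.toNat).drop lo.toNat).length = hi.toNat - lo.toNat := by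
    simp only [List.length_drop, List.length_take]
    omega
  have hr : PySem.Chars.rfind ((cs.take hi.toNat).drop lo.toNat) [' '] = ((m.toNat - lo.toNat : Nat) : Int) := by
    rw [PySem.Chars.rfind, hlen]
    apply pvRfindGo_eq
    · omega
    · apply (pvPrefixAt cs lo hi hlh hhi _).mpr
      constructor
      · omega
      · have : lo.toNat + (m.toNat - lo.toNat) = m.toNat := by omega
        rw [this]; exact h3
    · intro j' hja hjb
      by_contra hc
      rw [Bool.not_eq_false] at hc
      obtain ⟨hlt, hsome⟩ := (pvPrefixAt cs lo hi hlh hhi j').mp hc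
      refine h4 ((lo.toNat + j' : Nat) : Int) (by omega) (by omega) ?_
      rw [show (((lo.toNat + j' : Nat) : Int)).toNat = lo.toNat + j' by omega]
      exact hsome
  rw [hr]
  rw [if_neg (by omega)]
  omega


-- helper: filtered append of one piece
theorem pvFilterApp (acc : List (List Char)) (p : List Char) :
    (acc ++ [p]).filter (fun q => !q.isEmpty)
      = if p.isEmpty then acc.filter (fun q => !q.isEmpty) else acc.filter (fun q => !q.isEmpty) ++ [p] := by
  cases hp : p.isEmpty <;> simp [List.filter_append, hp]

theorem pvLoop_eq (cs : List Char) (mc ov : Int) (hmc : 0 < mc) (hov : ov < mc)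
    (fuel : Nat) (start : Int) (hstart : 0 ≤ start)
    (bi si : Nat)
    (hbi : bi ≤ (pvIdxWhere cs pvIsBreak).length)
    (hsi : si ≤ (pvIdxWhere cs (fun c => c == ' ')).length)
    (hbinv : ∀ j (h2 : j < (pvIdxWhere cs pvIsBreak).length), j < bi → (pvIdxWhere cs pvIsBreak)[j] ≤ start + mc)
    (hsinv : ∀ j (h2 : j < (pvIdxWhere cs (fun c => c == ' ')).length), j < si → (pvIdxWhere cs (fun c => c == ' '))[j] < start + mc)
    (acc : List (List Char)) :
    pvLoopB cs (cs.length : Int) mc ov (pvIdxWhere cs pvIsBreak) (pvIdxWhere cs (fun c => c == ' ')) fuel start bi si (acc.filter (fun p => !p.isEmpty))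
      = (pvLoopA cs (cs.length : Int) mc ov fuel start acc).filter (fun p => !p.isEmpty) := by
  induction fuel generalizing start bi si acc with
  | zero => rw [pvLoopA, pvLoopB]
  | succ fuel ih =>
    set n : Int := (cs.length : Int) with hn
    set L := pvIdxWhere cs pvIsBreak with hL
    set S := pvIdxWhere cs (fun c => c == ' ') with hS
    by_cases hsn : start < n
    · by_cases hne : n ≤ start + mc
      · -- final piece
        rw [pvLoopA, pvLoopB]
        simp only [hsn, if_pos, hne, pvFilterApp]
      · -- main window case: e < n
        have hen : start + mc < n := by omega
        have hss0 : 0 ≤ max start (start + mc - 400) := by omega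
        have hsse : max start (start + mc - 400) ≤ start + mc := by omega
        -- pointer advance for boundaries
        have hbpre : ∀ j (hj : j < bi), (fun v => decide (v ≤ start + mc)) (L[j]'(lt_of_lt_of_le hj hbi)) = true := by
          intro j hj
          simp only [decide_eq_true_eq]
          exact hbinv j (lt_of_lt_of_le hj hbi) hj
        have hspre : ∀ j (hj : j < si), (fun v => decide (v < start + mc)) (S[j]'(lt_of_lt_of_le hj hsi)) = true := by
          intro j hj
          simp only [decide_eq_true_eq]
          exact hsinv j (lt_of_lt_of_le hj hsi) hj
        obtain ⟨hq1, hq2, hq3, hq4⟩ := pvAdv_spec L (fun v => decide (v ≤ start + mc)) bi hbi hbpre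
        obtain ⟨hw, hw0⟩ := pvAdv_max L (fun v => decide (v ≤ start + mc)) bi hbi (pvIdxWhere_sorted cs pvIsBreak) hbpre
          (by intro a b hab hb; simp only [decide_eq_true_eq] at *; omega)
        obtain ⟨hp1, hp2, hp3, hp4⟩ := pvAdv_spec S (fun v => decide (v < start + mc)) si hsi hspre
        obtain ⟨hws, hws0⟩ := pvAdv_max S (fun v => decide (v < start + mc)) si hsi (pvIdxWhere_sorted cs _) hspre
          (by intro a b hab hb; simp only [decide_eq_true_eq] at *; omega)
        set q := pvAdv L (fun v => decide (v ≤ start + mc)) bi with hqd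
        set qs := pvAdv S (fun v => decide (v < start + mc)) si with hqsd
        set w := L.getD (q - 1) 0 with hwd
        set ws := S.getD (qs - 1) 0 with hwsd
        -- characterize membership as predicate on characters
        have hLmem : ∀ i : Int, 0 ≤ i → i < n → (pvIsBreak (PySem.List.pyGetD cs i ' ') = true ↔ i ∈ L) := by
          intro i hi0 hin
          rw [PySem.List.pyGetD_eq_getElem cs ' ' hi0 (by omega), pvIdxWhere_mem]
          constructor
          · intro h; exact ⟨i.toNat, by omega, by omega, h⟩
          · rintro ⟨k, hk, rfl, hpk⟩
            simpa using hpk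
        have hSmem : ∀ i : Int, 0 ≤ i → i < n → (cs[i.toNat]? = some ' ' ↔ i ∈ S) := by
          intro i hi0 hin
          rw [List.getElem?_eq_getElem (by omega : i.toNat < cs.length), pvIdxWhere_mem]
          constructor
          · intro h
            refine ⟨i.toNat, by omega, by omega, ?_⟩
            simp only [beq_iff_eq]
            exact Option.some_injective _ h
          · rintro ⟨k, hk, rfl, hpk⟩
            simp only [beq_iff_eq] at hpk
            simp [hpk]
        -- properties of the maximal boundary w (when the pointer is positive)
        have hwprops : 0 < q → (0 ≤ w ∧ w < n ∧ w ≤ start + mc ∧ pvIsBreak (PySem.List.pyGetD cs w ' ') = true ∧ ∀ v ∈ L, v ≤ start + mc → v ≤ w) := by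
          intro h0
          obtain ⟨hmem, hcmp, hmax⟩ := hw h0
          obtain ⟨k, hk, hwk, hpk⟩ := (pvIdxWhere_mem cs pvIsBreak w).mp hmem
          simp only [decide_eq_true_eq] at hcmp
          refine ⟨by omega, by omega, hcmp, ?_, ?_⟩
          · exact (hLmem w (by omega) (by omega)).mpr hmem
          · intro v hv hvle
            exact hmax v hv (by simpa using hvle)
        have hwsprops : 0 < qs → (0 ≤ ws ∧ ws < n ∧ ws < start + mc ∧ cs[ws.toNat]? = some ' ' ∧ ∀ v ∈ S, v < start + mc → v ≤ ws) := by
          intro h0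
          obtain ⟨hmem, hcmp, hmax⟩ := hws h0
          obtain ⟨k, hk, hwk, hpk⟩ := (pvIdxWhere_mem cs (fun c => c == ' ') ws).mp hmem
          simp only [decide_eq_true_eq] at hcmp
          refine ⟨by omega, by omega, hcmp, ?_, ?_⟩
          · exact (hSmem ws (by omega) (by omega)).mpr hmem
          · intro v hv hvle
            exact hmax v hv (by simpa using hvle)
        by_cases hb : 0 < q ∧ max start (start + mc - 400) < w
        · -- boundary branch on both sides
          obtain ⟨hw0', hwn, hwle, hwpred, hwmax⟩ := hwprops hb.1
          have hscan : pvFirstHit cs pvIsBreak (PySem.List.pyRange (start + mc) (max start (start + mc - 400)) (-1)) = some w := by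
            apply pvFirstHit_some cs pvIsBreak (start + mc) _ w hb.2 hwle hwpred
            intro i hi1 hi2
            by_contra hc
            rw [Bool.not_eq_false] at hc
            have hiL : i ∈ L := (hLmem i (by omega) (by omega)).mp hc
            have := hwmax i hiL hi2
            omega
          rw [pvLoopA, pvLoopB]
          simp only [hsn, if_pos, hne, ite_false, hscan]
          rw [if_pos (show (0:Nat) < q ∧ max start (start + mc - 400) < w from hb),
              if_pos (show start < w + 1 by omega)]
          have hihyp := ih (max (start + 1) (w + 1 - ov)) (by omega) q qs hq1 hp1
            (by intro j h2 hj
                have := hq3 j h2 hj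
                simp only [decide_eq_true_eq] at this
                omega)
            (by intro j h2 hj
                have := hp3 j h2 hj
                simp only [decide_eq_true_eq] at this
                omega)
            (acc ++ [PySem.Chars.strip (PySem.List.slice cs (some start) (some (w + 1)))])
          rw [pvFilterApp] at hihyp
          exact hihyp
        · -- no usable boundary: A's scan returns none, B skips its first branch
          have hscan : pvFirstHit cs pvIsBreak (PySem.List.pyRange (start + mc) (max start (start + mc - 400)) (-1)) = none := by
            apply pvFirstHit_none
            intro i hi1 hi2
            by_contra hc
            rw [Bool.not_eq_false] at hc
            have hiL : i ∈ L := (hLmem i (by omega) (by omega)).mp hc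
            rcases Nat.eq_zero_or_pos q with hq0 | hq0
            · have := hw0 hq0 i hiL
              simp only [decide_eq_false_iff_not] at this
              omega
            · obtain ⟨hw0', hwn, hwle, hwpred, hwmax⟩ := hwprops hq0
              have hiw := hwmax i hiL hi2
              have hnw : ¬ (max start (start + mc - 400) < w) := fun hcc => hb ⟨hq0, hcc⟩
              omega
          rw [pvLoopA, pvLoopB]
          simp only [hsn, if_pos, hne, ite_false, hscan]
          rw [if_neg (show ¬ ((0:Nat) < q ∧ max start (start + mc - 400) < w) from hb),
              if_neg (show ¬ (start < -1) by omega)]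
          -- now the space fallback
          by_cases hsb : 0 < qs ∧ max start (start + mc - 400) ≤ ws ∧ start < ws
          · obtain ⟨hws0', hwsn, hwslt, hwssp, hwsmax⟩ := hwsprops hsb.1
            have hsp : PySem.Chars.rfindFrom cs [' '] (max start (start + mc - 400)) (some (start + mc)) = ws := by
              apply pvRfind_some cs _ _ ws hss0 hsse (by omega) hsb.2.1 hwslt hwssp
              intro i hi1 hi2
              by_contra hc
              have hiS : i ∈ S := (hSmem i (by omega) (by omega)).mp hc
              have := hwsmax i hiS hi2
              omega
            rw [hsp, if_pos (show start < ws from hsb.2.2)]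
            have hihyp := ih (max (start + 1) (ws - ov)) (by omega) q qs hq1 hp1
              (by intro j h2 hj
                  have := hq3 j h2 hj
                  simp only [decide_eq_true_eq] at this
                  omega)
              (by intro j h2 hj
                  have := hp3 j h2 hj
                  simp only [decide_eq_true_eq] at this
                  omega)
              (acc ++ [PySem.Chars.strip (PySem.List.slice cs (some start) (some ws))])
            rw [pvFilterApp] at hihyp
            rw [if_pos hsb]
            exact hihyp
          · -- hard cut on both sides
            have hsp : ¬ (start < PySem.Chars.rfindFrom cs [' '] (max start (start + mc - 400)) (some (start + mc))) := by
              rcases Nat.eq_zero_or_pos qs with hq0 | hq0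
              · have hnone : PySem.Chars.rfindFrom cs [' '] (max start (start + mc - 400)) (some (start + mc)) = -1 := by
                  apply pvRfind_none cs _ _ hss0 hsse (by omega)
                  intro i hi1 hi2
                  by_contra hc
                  have hiS : i ∈ S := (hSmem i (by omega) (by omega)).mp hc
                  have := hws0 hq0 i hiS
                  simp only [decide_eq_false_iff_not] at this
                  omega
                rw [hnone]; omega
              · obtain ⟨hws0', hwsn, hwslt, hwssp, hwsmax⟩ := hwsprops hq0
                by_cases hwsge : max start (start + mc - 400) ≤ ws
                · have hspw : PySem.Chars.rfindFrom cs [' '] (max start (start + mc - 400)) (some (start + mc)) = ws := by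
                    apply pvRfind_some cs _ _ ws hss0 hsse (by omega) hwsge hwslt hwssp
                    intro i hi1 hi2
                    by_contra hc
                    have hiS : i ∈ S := (hSmem i (by omega) (by omega)).mp hc
                    have := hwsmax i hiS hi2
                    omega
                  rw [hspw]
                  intro hcc
                  exact hsb ⟨hq0, hwsge, hcc⟩
                · have hnone : PySem.Chars.rfindFrom cs [' '] (max start (start + mc - 400)) (some (start + mc)) = -1 := by
                    apply pvRfind_none cs _ _ hss0 hsse (by omega)
                    intro i hi1 hi2
                    by_contra hc
                    have hiS : i ∈ S := (hSmem i (by omega) (by omega)).mp hc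
                    have := hwsmax i hiS hi2
                    omega
                  rw [hnone]; omega
            rw [if_neg hsp, if_neg (show ¬ (0 < qs ∧ max start (start + mc - 400) ≤ ws ∧ start < ws) from hsb)]
            have hihyp := ih (start + mc - ov) (by omega) q qs hq1 hp1
              (by intro j h2 hj
                  have := hq3 j h2 hj
                  simp only [decide_eq_true_eq] at this
                  omega)
              (by intro j h2 hj
                  have := hp3 j h2 hj
                  simp only [decide_eq_true_eq] at this
                  omega)
              (acc ++ [PySem.Chars.strip (PySem.List.slice cs (some start) (some (start + mc)))])
            rw [pvFilterApp] at hihyp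
            exact hihyp
    · rw [pvLoopA, pvLoopB]
      simp [hsn]

-- ===== VERDICT (by name: the statement is the Claim_ definition above) =====
theorem enforce_max_chars_py_spec : Claim_equal_enforce_max_chars_py := by
  intro text mc ov _hdom hpre
  unfold Spec_enforce_max_chars_py
  unfold enforce_max_chars_py enforce_max_chars_py_alt
  by_cases hlen : PySem.Str.len text ≤ mc
  · simp only [PySem.Str.len_eq, String.length_toList] at hlen
    simp [hlen]
  · simp only [hlen, if_false]
    have hmcov : 0 < mc ∧ ov < mc := by
      rcases hpre with h | h
      · exact absurd h hlen
      · exact h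
    have heq := pvLoop_eq text.toList mc ov hmcov.1 hmcov.2 (text.toList.length + 1) 0 (le_refl 0) 0 0
      (Nat.zero_le _) (Nat.zero_le _) (by omega) (by omega) []
    simp only [List.filter_nil] at heq
    rw [← heq]
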